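-- pv_equiv track=rewrite | github.com/lynever/prac_programmars | 프로그래머스/lv1/67256. ［카카오 인턴］ 키패드 누르기/［카카오 인턴］ 키패드 누르기.py | solution
-- ===== SOURCE A (Python) =====
-- def dist(pos, tar):
--     dis, phonepos = 0, [1, 2, 3, 4, 5, 6, 7, 8, 9, 10, 0, 11]
--     npos, tpos = phonepos.index(pos), phonepos.index(tar)
--     dis = (tpos // 3 - npos // 3) + abs((tpos // 3 - npos // 3) * 3 + npos - tpos) if tpos > npos else (npos // 3 - tpos // 3) + abs((npos // 3 - tpos // 3) * 3 + tpos - npos)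
--     return dis
--
-- def solution(numbers, hand):
--     answer = ''
--     lpos, rpos = 10, 11
--     for i in numbers:
--         if i in [1, 4, 7]:
--             answer += 'L'
--             lpos = i
--         elif i in [3, 6, 9]:
--             answer += 'R'
--             rpos = i
--         elif i in [2, 5, 8, 0]:
--             ldis, rdis = dist(lpos, i), dist(rpos, i)
--             if ldis == rdis:
--                 if hand == 'right':
--                     answer += 'R'
--                     rpos = i
--                 else:
--                     answer += 'L'
--                     lpos = i
--             else:
--                 if ldis > rdis:
--                     answer += 'R'
--                     rpos = i
--                 else:
--                     answer += 'L'
--                     lpos = i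
--     return answer
-- ===== SOURCE B (Python) =====
-- def solution(numbers, hand):
--     # Precompute a complete transition table over the finite thumb-state space
--     # (left coord x right coord x key), then run the input through it as a
--     # pure lookup automaton.
--     def coord(n):
--         return (3, 1) if n == 0 else divmod(n - 1, 3)
--
--     lcells = [(0, 0), (1, 0), (2, 0), (3, 0), (0, 1), (1, 1), (2, 1), (3, 1)]
--     rcells = [(0, 2), (1, 2), (2, 2), (3, 2), (0, 1), (1, 1), (2, 1), (3, 1)]
--
--     def choose(lp, rp, n):
--         r, c = coord(n)
--         if c == 0:
--             go = 'L'
--         elif c == 2: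
--             go = 'R'
--         else:
--             ld = abs(lp[0] - r) + abs(lp[1] - c)
--             rd = abs(rp[0] - r) + abs(rp[1] - c)
--             go = 'R' if rd < ld or (rd == ld and hand == 'right') else 'L'
--         return (go, (r, c), rp) if go == 'L' else (go, lp, (r, c))
--
--     trans = {(lp, rp, n): choose(lp, rp, n)
--              for lp in lcells for rp in rcells for n in range(10)}
--
--     ans, lp, rp = [], (3, 0), (3, 2)
--     for n in numbers:
--         if (lp, rp, n) in trans:
--             go, lp, rp = trans[lp, rp, n]
--             ans.append(go)
--     return ''.join(ans)
-- ===== Notes on version B (the rewrite author's own statement) =====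
-- stated objective: alternative
-- what changed: Instead of recomputing the flat-index dist arithmetic at every press, B precomputes a complete transition table over the finite thumb-state space (left-coordinate x right-coordinate x key -> thumb and next state) and then runs the input as a pure table-lookup automaton, collecting the letters with ''.join.
import Mathlib
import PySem

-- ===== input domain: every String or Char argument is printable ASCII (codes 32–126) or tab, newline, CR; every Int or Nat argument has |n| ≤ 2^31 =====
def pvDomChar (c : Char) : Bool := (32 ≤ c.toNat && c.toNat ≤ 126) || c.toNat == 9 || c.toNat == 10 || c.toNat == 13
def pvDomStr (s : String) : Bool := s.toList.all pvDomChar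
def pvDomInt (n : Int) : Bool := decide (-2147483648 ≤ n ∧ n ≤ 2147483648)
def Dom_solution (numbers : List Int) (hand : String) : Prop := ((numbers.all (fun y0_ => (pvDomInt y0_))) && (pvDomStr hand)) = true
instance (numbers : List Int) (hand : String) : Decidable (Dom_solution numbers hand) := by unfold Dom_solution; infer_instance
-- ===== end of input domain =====

set_option maxRecDepth 8000


-- B precomputes a complete transition table over the finite thumb-state space and runs the
-- input as a pure table-lookup automaton instead of recomputing A's flat-index distance
-- arithmetic at every press; objective: alternative (same asymptotic cost).

-- ===== PORT A =====
-- dist(pos, tar): the .index calls always succeed on the keys solution passes (the getD 0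
-- default is never taken there); the // and abs arithmetic is transliterated exactly.
def distA (pos tar : Int) : Int :=
  let phonepos : List Int := [1, 2, 3, 4, 5, 6, 7, 8, 9, 10, 0, 11]
  let npos : Int := ((PySem.List.index? phonepos pos).getD 0 : Nat)
  let tpos : Int := ((PySem.List.index? phonepos tar).getD 0 : Nat)
  if tpos > npos then
    (PySem.Int.floordiv tpos 3 - PySem.Int.floordiv npos 3) +
      |(PySem.Int.floordiv tpos 3 - PySem.Int.floordiv npos 3) * 3 + npos - tpos|
  else
    (PySem.Int.floordiv npos 3 - PySem.Int.floordiv tpos 3) +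
      |(PySem.Int.floordiv npos 3 - PySem.Int.floordiv tpos 3) * 3 + tpos - npos|

-- the body of A's `for i in numbers` loop, on the state (answer, lpos, rpos)
def stepA (hand : String) (s : String × Int × Int) (i : Int) : String × Int × Int :=
  let answer := s.1
  let lpos := s.2.1
  let rpos := s.2.2
  if i ∈ ([1, 4, 7] : List Int) then (answer ++ "L", i, rpos)
  else if i ∈ ([3, 6, 9] : List Int) then (answer ++ "R", lpos, i)
  else if i ∈ ([2, 5, 8, 0] : List Int) then
    let ldis := distA lpos i
    let rdis := distA rpos i
    if ldis = rdis then
      if hand = "right" then (answer ++ "R", lpos, i) else (answer ++ "L", i, rpos)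
    else
      if ldis > rdis then (answer ++ "R", lpos, i) else (answer ++ "L", i, rpos)
  else s

def solution (numbers : List Int) (hand : String) : String :=
  (numbers.foldl (stepA hand) ("", 10, 11)).1

-- ===== PORT B =====
-- coord(n): (3,1) for the 0 key, else divmod(n-1, 3)
def coordB (n : Int) : Int × Int :=
  if n = 0 then (3, 1)
  else (PySem.Int.floordiv (n - 1) 3, PySem.Int.mod (n - 1) 3)  -- divmod with divisor 3 ≠ 0

def lcellsB : List (Int × Int) := [(0, 0), (1, 0), (2, 0), (3, 0), (0, 1), (1, 1), (2, 1), (3, 1)]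
def rcellsB : List (Int × Int) := [(0, 2), (1, 2), (2, 2), (3, 2), (0, 1), (1, 1), (2, 1), (3, 1)]

-- choose(lp, rp, n): the table entry for one state/key combination
def chooseB (hand : String) (lp rp : Int × Int) (n : Int) : String × (Int × Int) × (Int × Int) :=
  let rc := coordB n
  let r := rc.1
  let c := rc.2
  let go : String :=
    if c = 0 then "L"
    else if c = 2 then "R"
    else
      let ld := |lp.1 - r| + |lp.2 - c|
      let rd := |rp.1 - r| + |rp.2 - c|
      if rd < ld ∨ (rd = ld ∧ hand = "right") then "R" else "L"
  if go = "L" then (go, (r, c), rp) else (go, lp, (r, c))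

-- the key space of the comprehension: lp in lcells, rp in rcells, n in range(10)
def keysB : List ((Int × Int) × (Int × Int) × Int) :=
  lcellsB.flatMap fun lp => rcellsB.flatMap fun rp =>
    (PySem.List.pyRange 0 10 1).map fun n => (lp, rp, n)

-- trans = {(lp, rp, n): choose(lp, rp, n) for ...} (a comprehension is a loop of insertions)
def tableB (hand : String) : PySem.Dict ((Int × Int) × (Int × Int) × Int) (String × (Int × Int) × (Int × Int)) :=
  keysB.foldl (fun d k => d.insert k (chooseB hand k.1 k.2.1 k.2.2)) PySem.Dict.empty

-- the body of Source B's `for n in numbers` loop: membership test + lookup, as one get? match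
-- `if key in trans: … trans[key]` as one optional lookup applied to the state
def applyEntry (s : List String × (Int × Int) × (Int × Int)) :
    Option (String × (Int × Int) × (Int × Int)) → List String × (Int × Int) × (Int × Int)
  | none => s
  | some (go, lp', rp') => (s.1 ++ [go], lp', rp')

def stepB (hand : String) (s : List String × (Int × Int) × (Int × Int)) (n : Int) :
    List String × (Int × Int) × (Int × Int) :=
  applyEntry s ((tableB hand).get? (s.2.1, s.2.2, n))

def solution_alt (numbers : List Int) (hand : String) : String :=
  PySem.Str.join "" (numbers.foldl (stepB hand) ([], (3, 0), (3, 2))).1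

-- ===== PRECONDITION & SPEC =====
def Spec_solution (numbers : List Int) (hand : String) (out : String) : Prop := out = solution_alt numbers hand
instance (numbers : List Int) (hand : String) (out : String) : Decidable (Spec_solution numbers hand out) := by unfold Spec_solution; infer_instance

-- ===== CLAIM (what is proved, stated in full; the proofs are below) =====
def Claim_equal_solution : Prop := ∀ (numbers : List Int) (hand : String), Dom_solution numbers hand → Spec_solution numbers hand (solution numbers hand)

-- ===== LEMMAS AND PROOFS =====

-- coordinate of each reachable A-side thumb position (keys 0–9 plus the start keys * = 10, # = 11)
def coordOf (p : Int) : Int × Int :=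
  if p = 1 then (0, 0) else if p = 2 then (0, 1) else if p = 3 then (0, 2)
  else if p = 4 then (1, 0) else if p = 5 then (1, 1) else if p = 6 then (1, 2)
  else if p = 7 then (2, 0) else if p = 8 then (2, 1) else if p = 9 then (2, 2)
  else if p = 10 then (3, 0) else if p = 0 then (3, 1) else (3, 2)

-- positions the left / right thumb can ever occupy on A's side
def Lset : List Int := [10, 1, 4, 7, 2, 5, 8, 0]
def Rset : List Int := [11, 3, 6, 9, 2, 5, 8, 0]

-- A's distA (= dist) is Manhattan distance between the grid coordinates, on all reachable pairs
lemma dist_eq_manh :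
    ∀ p ∈ Lset ++ Rset, ∀ t ∈ ([2, 5, 8, 0] : List Int),
      distA p t = |(coordOf p).1 - (coordOf t).1| + |(coordOf p).2 - (coordOf t).2| := by
  decide

lemma jflat (l : List (List Char)) :
    (List.intersperse ([] : List Char) l).flatten = l.flatten := by
  induction l with
  | nil => rfl
  | cons x xs ih => cases xs <;> simp_all [List.intersperse]

lemma join_snoc (out : List String) (s : String) :
    PySem.Str.join "" (out ++ [s]) = PySem.Str.join "" out ++ s := by
  simp only [PySem.Str.join, PySem.Chars.join, List.intercalate, String.toList_empty,
    List.map_append, List.map_cons, List.map_nil, jflat, List.flatten_append,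
    List.flatten_cons, List.flatten_nil, List.append_nil, String.ofList_append,
    String.ofList_toList]


lemma pyRange10 : PySem.List.pyRange 0 10 1 = [0, 1, 2, 3, 4, 5, 6, 7, 8, 9] := by
  rw [PySem.List.pyRange_one]; decide

lemma keysB_nodup : keysB.Nodup := by
  unfold keysB
  rw [List.nodup_flatMap]
  constructor
  · intro lp _
    rw [List.nodup_flatMap]
    constructor
    · intro rp _
      exact (PySem.List.nodup_pyRange_one 0 10).map
        (fun a b h => by simpa using congrArg (fun p => p.2.2) h)
    · have hnd : rcellsB.Nodup := by decide
      refine hnd.imp ?_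
      intro a b hab
      simp only [Function.onFun]
      intro x hx1 hx2
      obtain ⟨n1, _, h1⟩ := List.mem_map.mp hx1
      obtain ⟨n2, _, h2⟩ := List.mem_map.mp hx2
      apply hab
      have := h1.trans h2.symm
      simpa using congrArg (fun p => p.2.1) this
  · have hnd : lcellsB.Nodup := by decide
    refine hnd.imp ?_
    intro a b hab
    simp only [Function.onFun]
    intro x hx1 hx2
    obtain ⟨r1, _, hy1⟩ := List.mem_flatMap.mp hx1
    obtain ⟨r2, _, hy2⟩ := List.mem_flatMap.mp hx2
    obtain ⟨n1, _, h1⟩ := List.mem_map.mp hy1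
    obtain ⟨n2, _, h2⟩ := List.mem_map.mp hy2
    apply hab
    have := h1.trans h2.symm
    simpa using congrArg (fun p => p.1) this

lemma mem_keysB (lp rp : Int × Int) (n : Int) :
    (lp, rp, n) ∈ keysB ↔ lp ∈ lcellsB ∧ rp ∈ rcellsB ∧ n ∈ PySem.List.pyRange 0 10 1 := by
  simp only [keysB, List.mem_flatMap, List.mem_map]
  constructor
  · rintro ⟨a, ha, b, hb, m, hm, h⟩
    cases h
    exact ⟨ha, hb, hm⟩
  · rintro ⟨ha, hb, hm⟩
    exact ⟨lp, ha, rp, hb, n, hm, rfl⟩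

lemma tableB_items (hand : String) :
    (tableB hand).items = keysB.map (fun k => (k, chooseB hand k.1 k.2.1 k.2.2)) := by
  unfold tableB
  exact PySem.Dict.items_foldl_insert_fresh keysB _ _ PySem.Dict.empty
    (fun a _ => by simp [PySem.Dict.contains_empty]) keysB_nodup

lemma tableB_keys (hand : String) : (tableB hand).keys = keysB := by
  simp only [PySem.Dict.keys, tableB_items, List.map_map]
  simp [Function.comp_def]

lemma tableB_get_some (hand : String) (lp rp : Int × Int) (n : Int)
    (h : (lp, rp, n) ∈ keysB) :
    (tableB hand).get? (lp, rp, n) = some (chooseB hand lp rp n) := by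
  apply PySem.Dict.get?_of_mem_items
  · rw [tableB_items]
    exact List.mem_map.mpr ⟨(lp, rp, n), h, rfl⟩
  · rw [tableB_keys]; exact keysB_nodup

lemma tableB_get_none (hand : String) (k : (Int × Int) × (Int × Int) × Int)
    (h : k ∉ keysB) : (tableB hand).get? k = none := by
  rw [PySem.Dict.get?_eq_none_iff_not_mem_keys, tableB_keys]
  exact h

-- evaluating one table entry, by the column of the pressed key
lemma chooseB_col0 (hand : String) (lp rp : Int × Int) (n : Int) (h : (coordB n).2 = 0) :
    chooseB hand lp rp n = ("L", coordB n, rp) := by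
  rcases hrc : coordB n with ⟨r, c⟩
  rw [hrc] at h
  simp only at h
  subst h
  simp [chooseB, hrc]

lemma chooseB_col2 (hand : String) (lp rp : Int × Int) (n : Int) (h : (coordB n).2 = 2) :
    chooseB hand lp rp n = ("R", lp, coordB n) := by
  rcases hrc : coordB n with ⟨r, c⟩
  rw [hrc] at h
  simp only at h
  subst h
  simp [chooseB, hrc]

lemma chooseB_mid_R (hand : String) (lp rp : Int × Int) (n : Int) (h : (coordB n).2 = 1)
    (hc : |rp.1 - (coordB n).1| + |rp.2 - (coordB n).2| < |lp.1 - (coordB n).1| + |lp.2 - (coordB n).2| ∨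
          (|rp.1 - (coordB n).1| + |rp.2 - (coordB n).2| = |lp.1 - (coordB n).1| + |lp.2 - (coordB n).2| ∧
           hand = "right")) :
    chooseB hand lp rp n = ("R", lp, coordB n) := by
  rcases hrc : coordB n with ⟨r, c⟩
  rw [hrc] at h hc
  simp only at h hc
  subst h
  simp only [chooseB, hrc]
  rw [if_neg (show ¬(1 : Int) = 0 by omega), if_neg (show ¬(1 : Int) = 2 by omega), if_pos hc,
    if_neg (show ¬("R" : String) = "L" by decide)]

lemma chooseB_mid_L (hand : String) (lp rp : Int × Int) (n : Int) (h : (coordB n).2 = 1)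
    (hc : ¬ (|rp.1 - (coordB n).1| + |rp.2 - (coordB n).2| < |lp.1 - (coordB n).1| + |lp.2 - (coordB n).2| ∨
            (|rp.1 - (coordB n).1| + |rp.2 - (coordB n).2| = |lp.1 - (coordB n).1| + |lp.2 - (coordB n).2| ∧
             hand = "right"))) :
    chooseB hand lp rp n = ("L", coordB n, rp) := by
  rcases hrc : coordB n with ⟨r, c⟩
  rw [hrc] at h hc
  simp only at h hc
  subst h
  simp only [chooseB, hrc]
  rw [if_neg (show ¬(1 : Int) = 0 by omega), if_neg (show ¬(1 : Int) = 2 by omega), if_neg hc,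
    if_pos (show ("L" : String) = "L" from rfl)]

-- reducing one stepB call from a table-lookup fact (without unfolding the table)
lemma stepB_some (hand : String) (out : List String) (lp rp : Int × Int) (n : Int)
    (go : String) (lp' rp' : Int × Int)
    (h : (tableB hand).get? (lp, rp, n) = some (go, lp', rp')) :
    stepB hand (out, lp, rp) n = (out ++ [go], lp', rp') := by
  show applyEntry (out, lp, rp) ((tableB hand).get? (lp, rp, n)) = (out ++ [go], lp', rp')
  rw [h]
  rfl

lemma stepB_none (hand : String) (out : List String) (lp rp : Int × Int) (n : Int)
    (h : (tableB hand).get? (lp, rp, n) = none) :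
    stepB hand (out, lp, rp) n = (out, lp, rp) := by
  show applyEntry (out, lp, rp) ((tableB hand).get? (lp, rp, n)) = (out, lp, rp)
  rw [h]
  rfl

-- one loop iteration: the two step functions stay in lock-step on reachable states
lemma step_corr (hand : String) (a : String) (out : List String) (lpos rpos i : Int)
    (hl : lpos ∈ Lset) (hr : rpos ∈ Rset) (ha : a = PySem.Str.join "" out) :
    ∃ a' out' lpos' rpos',
      stepA hand (a, lpos, rpos) i = (a', lpos', rpos') ∧
      stepB hand (out, coordOf lpos, coordOf rpos) i = (out', coordOf lpos', coordOf rpos') ∧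
      a' = PySem.Str.join "" out' ∧ lpos' ∈ Lset ∧ rpos' ∈ Rset := by
  have hlc : coordOf lpos ∈ lcellsB := by fin_cases hl <;> decide
  have hrc : coordOf rpos ∈ rcellsB := by fin_cases hr <;> decide
  by_cases hk : i ∈ ([0, 1, 2, 3, 4, 5, 6, 7, 8, 9] : List Int)
  · have hget : (tableB hand).get? (coordOf lpos, coordOf rpos, i) =
        some (chooseB hand (coordOf lpos) (coordOf rpos) i) :=
      tableB_get_some hand _ _ i
        ((mem_keysB _ _ i).mpr ⟨hlc, hrc, by rw [pyRange10]; exact hk⟩)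
    have hco : coordB i = coordOf i := by fin_cases hk <;> decide
    by_cases h1 : i ∈ ([1, 4, 7] : List Int)
    · have hc0 : (coordB i).2 = 0 := by fin_cases h1 <;> decide
      refine ⟨a ++ "L", out ++ ["L"], i, rpos, ?_, ?_, ?_, ?_, hr⟩
      · simp [stepA, h1]
      · have h' := hget
        rw [chooseB_col0 hand _ _ i hc0, hco] at h'
        exact stepB_some hand out _ _ i _ _ _ h'
      · rw [ha, join_snoc]
      · fin_cases h1 <;> decide
    · by_cases h3 : i ∈ ([3, 6, 9] : List Int)
      · have hc2 : (coordB i).2 = 2 := by fin_cases h3 <;> decide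
        refine ⟨a ++ "R", out ++ ["R"], lpos, i, ?_, ?_, ?_, hl, ?_⟩
        · simp [stepA, h1, h3]
        · have h' := hget
          rw [chooseB_col2 hand _ _ i hc2, hco] at h'
          exact stepB_some hand out _ _ i _ _ _ h'
        · rw [ha, join_snoc]
        · fin_cases h3 <;> decide
      · have h2 : i ∈ ([2, 5, 8, 0] : List Int) := by
          fin_cases hk <;> simp_all
        have hc1 : (coordB i).2 = 1 := by fin_cases h2 <;> decide
        have hdl : distA lpos i =
            |(coordOf lpos).1 - (coordB i).1| + |(coordOf lpos).2 - (coordB i).2| := by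
          rw [hco]; exact dist_eq_manh lpos (by fin_cases hl <;> decide) i h2
        have hdr : distA rpos i =
            |(coordOf rpos).1 - (coordB i).1| + |(coordOf rpos).2 - (coordB i).2| := by
          rw [hco]; exact dist_eq_manh rpos (by fin_cases hr <;> decide) i h2
        have hmemL : i ∈ Lset := by fin_cases h2 <;> decide
        have hmemR : i ∈ Rset := by fin_cases h2 <;> decide
        rcases lt_trichotomy (distA lpos i) (distA rpos i) with hlt | heq | hgt
        · have hcond : ¬ (|(coordOf rpos).1 - (coordB i).1| + |(coordOf rpos).2 - (coordB i).2| <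
              |(coordOf lpos).1 - (coordB i).1| + |(coordOf lpos).2 - (coordB i).2| ∨
              (|(coordOf rpos).1 - (coordB i).1| + |(coordOf rpos).2 - (coordB i).2| =
               |(coordOf lpos).1 - (coordB i).1| + |(coordOf lpos).2 - (coordB i).2| ∧ hand = "right")) := by
            rw [← hdl, ← hdr]; omega
          refine ⟨a ++ "L", out ++ ["L"], i, rpos, ?_, ?_, ?_, hmemL, hr⟩
          · simp [stepA, h1, h3, h2, hlt.ne, not_lt.mpr hlt.le]
          · have h' := hget
            rw [chooseB_mid_L hand _ _ i hc1 hcond, hco] at h'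
            exact stepB_some hand out _ _ i _ _ _ h'
          · rw [ha, join_snoc]
        · by_cases hh : hand = "right"
          · have hcond : (|(coordOf rpos).1 - (coordB i).1| + |(coordOf rpos).2 - (coordB i).2| <
                |(coordOf lpos).1 - (coordB i).1| + |(coordOf lpos).2 - (coordB i).2| ∨
                (|(coordOf rpos).1 - (coordB i).1| + |(coordOf rpos).2 - (coordB i).2| =
                 |(coordOf lpos).1 - (coordB i).1| + |(coordOf lpos).2 - (coordB i).2| ∧ hand = "right")) :=
              Or.inr ⟨by rw [← hdl, ← hdr]; omega, hh⟩
            refine ⟨a ++ "R", out ++ ["R"], lpos, i, ?_, ?_, ?_, hl, hmemR⟩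
            · simp [stepA, h1, h3, h2, heq, hh]
            · have h' := hget
              rw [chooseB_mid_R hand _ _ i hc1 hcond, hco] at h'
              exact stepB_some hand out _ _ i _ _ _ h'
            · rw [ha, join_snoc]
          · have hcond : ¬ (|(coordOf rpos).1 - (coordB i).1| + |(coordOf rpos).2 - (coordB i).2| <
                |(coordOf lpos).1 - (coordB i).1| + |(coordOf lpos).2 - (coordB i).2| ∨
                (|(coordOf rpos).1 - (coordB i).1| + |(coordOf rpos).2 - (coordB i).2| =
                 |(coordOf lpos).1 - (coordB i).1| + |(coordOf lpos).2 - (coordB i).2| ∧ hand = "right")) := by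
              rw [← hdl, ← hdr]
              rintro (h | ⟨-, h⟩)
              · omega
              · exact hh h
            refine ⟨a ++ "L", out ++ ["L"], i, rpos, ?_, ?_, ?_, hmemL, hr⟩
            · simp [stepA, h1, h3, h2, heq, hh]
            · have h' := hget
              rw [chooseB_mid_L hand _ _ i hc1 hcond, hco] at h'
              exact stepB_some hand out _ _ i _ _ _ h'
            · rw [ha, join_snoc]
        · have hcond : (|(coordOf rpos).1 - (coordB i).1| + |(coordOf rpos).2 - (coordB i).2| <
              |(coordOf lpos).1 - (coordB i).1| + |(coordOf lpos).2 - (coordB i).2| ∨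
              (|(coordOf rpos).1 - (coordB i).1| + |(coordOf rpos).2 - (coordB i).2| =
               |(coordOf lpos).1 - (coordB i).1| + |(coordOf lpos).2 - (coordB i).2| ∧ hand = "right")) :=
            Or.inl (by rw [← hdl, ← hdr]; omega)
          refine ⟨a ++ "R", out ++ ["R"], lpos, i, ?_, ?_, ?_, hl, hmemR⟩
          · simp [stepA, h1, h3, h2, hgt.ne', hgt]
          · have h' := hget
            rw [chooseB_mid_R hand _ _ i hc1 hcond, hco] at h'
            exact stepB_some hand out _ _ i _ _ _ h'
          · rw [ha, join_snoc]
  · -- key not on the pad: both loops skip it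
    have hnone : (tableB hand).get? (coordOf lpos, coordOf rpos, i) = none := by
      apply tableB_get_none
      intro hmem
      have := ((mem_keysB _ _ i).mp hmem).2.2
      rw [pyRange10] at this
      exact hk this
    have h1 : i ∉ ([1, 4, 7] : List Int) := by
      intro h; apply hk; fin_cases h <;> decide
    have h3 : i ∉ ([3, 6, 9] : List Int) := by
      intro h; apply hk; fin_cases h <;> decide
    have h2 : i ∉ ([2, 5, 8, 0] : List Int) := by
      intro h; apply hk; fin_cases h <;> decide
    refine ⟨a, out, lpos, rpos, ?_, ?_, ha, hl, hr⟩
    · simp [stepA, h1, h3, h2]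
    · exact stepB_none hand out _ _ i hnone

lemma loop_eq (hand : String) :
    ∀ (numbers : List Int) (a : String) (out : List String) (lpos rpos : Int),
      lpos ∈ Lset → rpos ∈ Rset → a = PySem.Str.join "" out →
      (numbers.foldl (stepA hand) (a, lpos, rpos)).1 =
        PySem.Str.join "" (numbers.foldl (stepB hand) (out, coordOf lpos, coordOf rpos)).1 := by
  intro numbers
  induction numbers with
  | nil => intro a out lpos rpos _ _ ha; simpa using ha
  | cons i ns ih =>
    intro a out lpos rpos hl hr ha
    obtain ⟨a', out', lpos', rpos', hA, hB, ha', hl', hr'⟩ :=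
      step_corr hand a out lpos rpos i hl hr ha
    simp only [List.foldl_cons, hA, hB]
    exact ih a' out' lpos' rpos' hl' hr' ha'

-- ===== VERDICT (by name: the statement is the Claim_ definition above) =====
theorem solution_spec : Claim_equal_solution := by
  intro numbers hand _
  unfold Spec_solution solution solution_alt
  have h0 : ((3, 0) : Int × Int) = coordOf 10 := by decide
  have h1 : ((3, 2) : Int × Int) = coordOf 11 := by decide
  rw [h0, h1]
  exact loop_eq hand numbers "" [] 10 11 (by decide) (by decide) (by decide)
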